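-- pv_equiv track=rewrite | github.com/shreyas1104/Naive-Bayes-Classifier | main.py | find_spl_words
-- ===== SOURCE A (Python) =====
-- def find_spl_words(feature_set, threshold):
--
--     spl_keywords = {}
--     uless = {"trump", "trump's","hillary","hillary's", "hillaryclinton", "s", "t", "donald"}
--
--     for key, val in feature_set.items():
--
--         if key not in uless:
--
--             key_arr = sorted(val, key = val.get, reverse = True)
--             val_arr = sorted(val.values(), reverse = True)
--
--             if len(key_arr) > 1:
--
--                 diff = val_arr[0] - val_arr[1]
--
--             else:
--
--                 diff = val_arr[0]
--
--             if diff > threshold: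
--
--                 spl_keywords[key] = key_arr[0]
--
--     return spl_keywords
-- ===== SOURCE B (Python) =====
-- def find_spl_words(feature_set, threshold):
--
--     spl_keywords = {}
--     uless = {"trump", "trump's","hillary","hillary's", "hillaryclinton", "s", "t", "donald"}
--
--     for key, val in feature_set.items():
--
--         if key in uless:
--             continue
--
--         # one linear pass: first-seen argmax, max, and second-largest value
--         best_k = best_v = second = None
--         for k, v in val.items():
--             if best_v is None or v > best_v:
--                 best_k, best_v, second = k, v, best_v
--             elif second is None or v > second:
--                 second = v
--
--         if best_v is None:
--             continue  # empty feature dict: nothing to rank (A raises IndexError here)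
--
--         diff = best_v if second is None else best_v - second
--
--         if diff > threshold:
--             spl_keywords[key] = best_k
--
--     return spl_keywords
-- ===== Notes on version B (the rewrite author's own statement) =====
-- stated objective: alternative
-- what changed: Per feature, A builds two sorted copies (keys sorted by value, values sorted) to read off the top key and the top-two value gap; B makes one linear pass over the dict items tracking the first-seen argmax key, the maximum and the second-largest value (O(n) per feature instead of O(n log n), same wall-clock in CPython).
-- crash fix: On inputs where some non-stop-word feature maps to an empty dict, A raises IndexError (val_arr[0]); B skips that feature and returns the keywords collected from the other features. — e.g. on find_spl_words([("good", [])], 0): A raises IndexError, B returns []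
import Mathlib
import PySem

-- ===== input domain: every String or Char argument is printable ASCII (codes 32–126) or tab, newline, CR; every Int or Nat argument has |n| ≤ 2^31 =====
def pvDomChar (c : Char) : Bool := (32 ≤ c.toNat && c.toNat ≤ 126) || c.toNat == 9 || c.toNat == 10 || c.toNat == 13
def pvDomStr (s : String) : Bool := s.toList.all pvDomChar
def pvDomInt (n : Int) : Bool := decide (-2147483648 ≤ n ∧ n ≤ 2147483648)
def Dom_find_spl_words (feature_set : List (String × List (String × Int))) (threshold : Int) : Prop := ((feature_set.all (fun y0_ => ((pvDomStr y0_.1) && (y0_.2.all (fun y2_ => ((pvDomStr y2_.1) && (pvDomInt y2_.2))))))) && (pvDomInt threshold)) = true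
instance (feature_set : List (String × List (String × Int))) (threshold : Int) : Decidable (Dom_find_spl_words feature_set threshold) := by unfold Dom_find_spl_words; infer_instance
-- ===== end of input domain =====

-- B replaces A's two sorts per feature by one linear pass keeping (first-seen argmax, max, second-max).
-- (The equivalence is about the RETURN value; neither program mutates its arguments.)

-- ===== PORT A =====
def find_spl_words (feature_set : List (String × List (String × Int))) (threshold : Int) : List (String × String) :=
  let uless : PySem.Set String := PySem.Set.ofList ["trump", "trump's", "hillary", "hillary's", "hillaryclinton", "s", "t", "donald"]
  let spl_keywords := (PySem.Dict.ofList feature_set).items.foldl (fun spl_keywords kv =>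
    if uless.contains kv.1 then spl_keywords
    else
      let val := PySem.Dict.ofList kv.2
      -- key=val.get: every element sorted here is a key of val, so val.get k is its value; ported as getD k 0
      let key_arr := PySem.List.sorted val.keys (fun k => val.getD k 0) true
      let val_arr := PySem.List.sorted val.values (fun x => x) true
      -- val_arr[0] / val_arr[1]: IndexError on an empty feature dict is excluded by Pre_
      let diff := if 1 < key_arr.length then
          (PySem.List.pyGet? val_arr 0).getD 0 - (PySem.List.pyGet? val_arr 1).getD 0
        else
          (PySem.List.pyGet? val_arr 0).getD 0
      if threshold < diff then spl_keywords.insert kv.1 ((PySem.List.pyGet? key_arr 0).getD "")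
      else spl_keywords) PySem.Dict.empty
  spl_keywords.items

-- ===== PORT B =====
-- Source B's inner loop state (best_k, best_v, second), all None at start: Option (key × max × Option second)
def pvScanStep (st : Option (String × Int × Option Int)) (p : String × Int) : Option (String × Int × Option Int) :=
  match st with
  | none => some (p.1, p.2, none)
  | some (bk, bv, s) =>
    if bv < p.2 then some (p.1, p.2, some bv)
    else
      match s with
      | none => some (bk, bv, some p.2)
      | some sv => if sv < p.2 then some (bk, bv, some p.2) else some (bk, bv, some sv)

def find_spl_words_alt (feature_set : List (String × List (String × Int))) (threshold : Int) : List (String × String) :=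
  let uless : PySem.Set String := PySem.Set.ofList ["trump", "trump's", "hillary", "hillary's", "hillaryclinton", "s", "t", "donald"]
  let spl_keywords := (PySem.Dict.ofList feature_set).items.foldl (fun spl_keywords kv =>
    if uless.contains kv.1 then spl_keywords
    else
      match (PySem.Dict.ofList kv.2).items.foldl pvScanStep none with
      | none => spl_keywords          -- empty feature dict: nothing to rank
      | some (bk, bv, s) =>
        let diff := match s with | none => bv | some sv => bv - sv
        if threshold < diff then spl_keywords.insert kv.1 bk else spl_keywords) PySem.Dict.empty
  spl_keywords.items

-- ===== PRECONDITION & SPEC =====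
-- Pre_ excludes inputs where some kept (non-stop-word) feature carries an EMPTY dict: A's val_arr[0] raises IndexError there.
def Pre_find_spl_words (feature_set : List (String × List (String × Int))) (threshold : Int) : Prop :=
  ∀ p ∈ (PySem.Dict.ofList feature_set).items,
    (PySem.Set.ofList ["trump", "trump's", "hillary", "hillary's", "hillaryclinton", "s", "t", "donald"]).contains p.1 = false →
    p.2 ≠ []
instance (feature_set : List (String × List (String × Int))) (threshold : Int) : Decidable (Pre_find_spl_words feature_set threshold) := by unfold Pre_find_spl_words; infer_instance
def pvWitness_find_spl_words : (List (String × List (String × Int))) × Int := ([("good", [("a", 5), ("b", 1)])], 2)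

-- On inputs where some kept feature maps to an empty dict, A raises IndexError; B skips that feature and returns the dict built from the others.
def Raises_find_spl_words (feature_set : List (String × List (String × Int))) (threshold : Int) : Prop :=
  ∃ p ∈ (PySem.Dict.ofList feature_set).items,
    (PySem.Set.ofList ["trump", "trump's", "hillary", "hillary's", "hillaryclinton", "s", "t", "donald"]).contains p.1 = false ∧
    p.2 = []
instance (feature_set : List (String × List (String × Int))) (threshold : Int) : Decidable (Raises_find_spl_words feature_set threshold) := by unfold Raises_find_spl_words; infer_instance
def pvRaiseWitness_find_spl_words : (List (String × List (String × Int))) × Int := ([("good", [])], 0)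
def pvRaiseWitnessOut_find_spl_words : List (String × String) := []

def Spec_find_spl_words (feature_set : List (String × List (String × Int))) (threshold : Int) (out : List (String × String)) : Prop := out = find_spl_words_alt feature_set threshold
instance (feature_set : List (String × List (String × Int))) (threshold : Int) (out : List (String × String)) : Decidable (Spec_find_spl_words feature_set threshold out) := by unfold Spec_find_spl_words; infer_instance

-- ===== CLAIM (what is proved, stated in full; the proofs are below) =====
def Claim_equal_find_spl_words : Prop := ∀ (feature_set : List (String × List (String × Int))) (threshold : Int), Dom_find_spl_words feature_set threshold → Pre_find_spl_words feature_set threshold → Spec_find_spl_words feature_set threshold (find_spl_words feature_set threshold)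
def Claim_raises_find_spl_words : Prop := (∀ (feature_set : List (String × List (String × Int))) (threshold : Int), Dom_find_spl_words feature_set threshold → Raises_find_spl_words feature_set threshold → ¬ Pre_find_spl_words feature_set threshold) ∧ (Dom_find_spl_words (pvRaiseWitness_find_spl_words.1) (pvRaiseWitness_find_spl_words.2) ∧ Raises_find_spl_words (pvRaiseWitness_find_spl_words.1) (pvRaiseWitness_find_spl_words.2) ∧ find_spl_words_alt (pvRaiseWitness_find_spl_words.1) (pvRaiseWitness_find_spl_words.2) = pvRaiseWitnessOut_find_spl_words)

-- ===== LEMMAS AND PROOFS =====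

-- the (best_k, best_v, second) triple read off a descending-sorted item list
def pvPhi (s : List (String × Int)) : Option (String × Int × Option Int) :=
  match s with
  | [] => none
  | [p] => some (p.1, p.2, none)
  | p :: q :: _ => some (p.1, p.2, some q.2)

lemma pvPhi_insertBy (x : String × Int) (s : List (String × Int)) :
    pvPhi (PySem.List.insertBy (fun a b => decide (b.2 < a.2)) x s) = pvScanStep (pvPhi s) x := by
  rcases s with _ | ⟨p, _ | ⟨q, r⟩⟩ <;>
    simp only [PySem.List.insertBy, pvPhi, pvScanStep] <;> split_ifs <;>
    simp_all

lemma pvScan_foldl (l : List (String × Int)) : ∀ acc : List (String × Int),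
    l.foldl pvScanStep (pvPhi acc) =
      pvPhi (l.foldl (fun a x => PySem.List.insertBy (fun a b => decide (b.2 < a.2)) x a) acc) := by
  induction l with
  | nil => intro acc; rfl
  | cons x l ih =>
    intro acc
    simp only [List.foldl_cons, ← pvPhi_insertBy]
    exact ih _

lemma pvScan_sorted (l : List (String × Int)) :
    l.foldl pvScanStep none = pvPhi (PySem.List.sorted l (fun p => p.2) true) := by
  rw [PySem.List.sorted_rev_eq_foldl_insertBy]
  exact pvScan_foldl l []

lemma pvInsertBy_map {β : Type} (f : String × Int → β) (g : β → Int) (x : String × Int)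
    (ys : List (String × Int)) (h : ∀ y, (y = x ∨ y ∈ ys) → g (f y) = y.2) :
    PySem.List.insertBy (fun a b => decide (g b < g a)) (f x) (ys.map f) =
      (PySem.List.insertBy (fun a b => decide (b.2 < a.2)) x ys).map f := by
  induction ys with
  | nil => simp [PySem.List.insertBy]
  | cons y ys ih =>
    have hx : g (f x) = x.2 := h x (Or.inl rfl)
    have hy : g (f y) = y.2 := h y (Or.inr (List.mem_cons_self ..))
    simp only [List.map_cons, PySem.List.insertBy, hx, hy]
    split_ifs with hc
    · simp
    · simp only [List.map_cons, List.cons.injEq, true_and]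
      exact ih (fun z hz => h z (hz.imp id (List.mem_cons_of_mem _)))

lemma pvSorted_map {β : Type} (f : String × Int → β) (g : β → Int) (l : List (String × Int))
    (h : ∀ a ∈ l, g (f a) = a.2) :
    PySem.List.sorted (l.map f) g true = (PySem.List.sorted l (fun p => p.2) true).map f := by
  rw [PySem.List.sorted_rev_eq_foldl_insertBy, PySem.List.sorted_rev_eq_foldl_insertBy]
  suffices haux : ∀ (l acc : List (String × Int)), (∀ a, (a ∈ l ∨ a ∈ acc) → g (f a) = a.2) →
      List.foldl (fun a x => PySem.List.insertBy (fun a b => decide (g b < g a)) x a) (acc.map f) (l.map f) =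
        (List.foldl (fun a x => PySem.List.insertBy (fun a b => decide (b.2 < a.2)) x a) acc l).map f by
    exact haux l [] (fun a ha => h a (by simpa using ha))
  intro l
  induction l with
  | nil => intro acc _; rfl
  | cons x l ih =>
    intro acc hacc
    simp only [List.map_cons, List.foldl_cons]
    rw [pvInsertBy_map f g x acc (fun y hy => hacc y (Or.imp_left (fun e => by simp [e]) hy))]
    exact ih _ (fun a ha => by
      rcases ha with ha | ha
      · exact hacc a (Or.inl (List.mem_cons_of_mem _ ha))
      · rcases (PySem.List.mem_insertBy _ _ _ _).1 ha with rfl | ha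
        · exact hacc a (Or.inl (List.mem_cons_self ..))
        · exact hacc a (Or.inr ha))

lemma pvOfList_items_ne_nil (v : List (String × Int)) (hv : v ≠ []) :
    (PySem.Dict.ofList v).items ≠ [] := by
  suffices haux : ∀ (t : List (String × Int)) (d : PySem.Dict String Int), d.items ≠ [] →
      (List.foldl (fun acc p => acc.insert p.1 p.2) d t).items ≠ [] by
    rcases v with _ | ⟨c, t⟩
    · exact absurd rfl hv
    · exact haux t (PySem.Dict.empty.insert c.1 c.2) (by simp [PySem.Dict.empty, PySem.Dict.insert, PySem.Dict.contains])
  intro t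
  induction t with
  | nil => intro d hd; exact hd
  | cons p t ih =>
    intro d hd
    refine ih _ ?_
    rw [PySem.Dict.items_insert]
    split_ifs
    · simpa using hd
    · simp

-- ===== VERDICT (by name: the statement is the Claim_ definition above) =====
theorem find_spl_words_spec : Claim_equal_find_spl_words := by
  intro fs th _ hpre
  unfold Spec_find_spl_words find_spl_words find_spl_words_alt
  simp only []
  congr 1
  apply PySem.List.foldl_congr_mem
  intro acc kv hmem
  by_cases hc : (PySem.Set.ofList ["trump", "trump's", "hillary", "hillary's", "hillaryclinton", "s", "t", "donald"]).contains kv.1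
  · rw [if_pos hc, if_pos hc]
  · rw [if_neg hc, if_neg hc]
    set d := PySem.Dict.ofList kv.2 with hd
    have hnd : d.keys.Nodup := PySem.Dict.nodup_keys_ofList kv.2
    have hg : ∀ a ∈ d.items, d.getD a.1 0 = a.2 := by
      intro a ha
      exact PySem.Dict.getD_of_mem_items d (by rcases a with ⟨k, v⟩; exact ha) hnd 0
    have hk : PySem.List.sorted d.keys (fun k => d.getD k 0) true
        = (PySem.List.sorted d.items (fun p => p.2) true).map Prod.fst :=
      pvSorted_map Prod.fst (fun k => d.getD k 0) d.items hg
    have hv : PySem.List.sorted d.values (fun x => x) true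
        = (PySem.List.sorted d.items (fun p => p.2) true).map Prod.snd :=
      pvSorted_map Prod.snd (fun x => x) d.items (fun a _ => rfl)
    have hb := pvScan_sorted d.items
    have hne : d.items ≠ [] :=
      pvOfList_items_ne_nil kv.2 (hpre kv hmem (by simpa using hc))
    have hs : PySem.List.sorted d.items (fun p => p.2) true ≠ [] := by
      simpa [PySem.List.sorted_eq_nil_iff] using hne
    rcases hS : PySem.List.sorted d.items (fun p => p.2) true with _ | ⟨p, t⟩
    · exact absurd hS hs
    · rw [hS] at hk hv hb
      rcases t with _ | ⟨q, r⟩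
      · simp [hk, hv, hb, pvPhi, PySem.List.pyGet?, PySem.List.pyIdx?]
      · have h01 : (0:Int) ≤ (r.length:Int) + 1 := by positivity
        simp [hk, hv, hb, pvPhi, PySem.List.pyGet?, PySem.List.pyIdx?, h01]

@[simp] theorem find_spl_words_raises : Claim_raises_find_spl_words := by
  unfold Claim_raises_find_spl_words
  exact ⟨by intro fs th _ ⟨p, hp, hc, he⟩ hpre; exact (hpre p hp hc) he, by decide⟩
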